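-- pv_equiv track=rewrite | github.com/DeqingFu/TTIC-31110-Final-Project | otherdistance.py | _eqPingQiaoShe
-- ===== SOURCE A (Python) =====
-- def _eqPingQiaoShe(c1, c2):
--     tmp1 = c1
--     tmp2 = c2
--     fromLst = ['sh', 'zh', 'ch']
--     toLst = ['s', 'z', 'c']
--     for i in range(3):
--         tmp1 = tmp1.replace(fromLst[i], toLst[i])
--         tmp2 = tmp2.replace(fromLst[i], toLst[i])
--     return tmp1 == tmp2
-- ===== SOURCE B (Python) =====
-- def _normalize(s):
--     out = []
--     i = 0
--     n = len(s)
--     while i < n: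
--         ch = s[i]
--         if ch in ('s', 'z', 'c') and i + 1 < n and s[i + 1] == 'h':
--             out.append(ch)
--             i += 2
--         else:
--             out.append(ch)
--             i += 1
--     return ''.join(out)
--
-- def _eqPingQiaoShe(c1, c2):
--     return _normalize(c1) == _normalize(c2)
-- ===== Notes on version B (the rewrite author's own statement) =====
-- stated objective: alternative
-- what changed: Replaces three sequential full-string non-overlapping replace passes ('sh'->'s','zh'->'z','ch'->'c') by a single left-to-right scan that emits the retroflex initial and skips its 'h', then compares the two normalized strings; in pure Python this trades C-implemented str.replace passes for one explicit scan, so it is not faster.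
import Mathlib
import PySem

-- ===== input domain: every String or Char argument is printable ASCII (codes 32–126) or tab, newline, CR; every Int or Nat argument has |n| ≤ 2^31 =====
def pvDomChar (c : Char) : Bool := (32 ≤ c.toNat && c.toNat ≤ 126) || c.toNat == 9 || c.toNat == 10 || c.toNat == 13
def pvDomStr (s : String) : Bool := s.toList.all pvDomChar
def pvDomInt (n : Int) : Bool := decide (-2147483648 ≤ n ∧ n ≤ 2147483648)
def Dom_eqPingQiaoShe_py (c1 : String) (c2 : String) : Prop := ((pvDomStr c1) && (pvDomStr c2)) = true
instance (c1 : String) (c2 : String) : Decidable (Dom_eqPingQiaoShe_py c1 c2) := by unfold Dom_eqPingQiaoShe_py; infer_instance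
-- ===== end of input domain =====

-- B replaces A's three sequential full-string replace passes by one left-to-right scan per string.

-- ===== PORT A =====
def eqPingQiaoShe_py (c1 : String) (c2 : String) : Bool :=
  let fromLst : List String := ["sh", "zh", "ch"]
  let toLst : List String := ["s", "z", "c"]
  let p := (PySem.List.pyRange 0 3 1).foldl
    (fun (st : String × String) i =>
      (PySem.Str.replace st.1 ((PySem.List.pyGet? fromLst i).getD "") ((PySem.List.pyGet? toLst i).getD ""),
       PySem.Str.replace st.2 ((PySem.List.pyGet? fromLst i).getD "") ((PySem.List.pyGet? toLst i).getD "")))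
    (c1, c2)
  p.1 == p.2

-- ===== PORT B =====
-- single scan: an 's'/'z'/'c' followed by 'h' emits just the initial and consumes both chars
def pvNorm : List Char → List Char
  | [] => []
  | [c] => [c]
  | c :: d :: t =>
    if (c = 's' ∨ c = 'z' ∨ c = 'c') ∧ d = 'h' then c :: pvNorm t
    else c :: pvNorm (d :: t)

def eqPingQiaoShe_py_alt (c1 : String) (c2 : String) : Bool :=
  String.ofList (pvNorm c1.toList) == String.ofList (pvNorm c2.toList)

-- ===== PRECONDITION & SPEC =====
def Spec_eqPingQiaoShe_py (c1 : String) (c2 : String) (out : Bool) : Prop := out = eqPingQiaoShe_py_alt c1 c2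
instance (c1 : String) (c2 : String) (out : Bool) : Decidable (Spec_eqPingQiaoShe_py c1 c2 out) := by unfold Spec_eqPingQiaoShe_py; infer_instance

-- ===== CLAIM (what is proved, stated in full; the proofs are below) =====
def Claim_equal_eqPingQiaoShe_py : Prop := ∀ (c1 : String) (c2 : String), Dom_eqPingQiaoShe_py c1 c2 → Spec_eqPingQiaoShe_py c1 c2 (eqPingQiaoShe_py c1 c2)

-- ===== LEMMAS AND PROOFS =====

-- one replace pass with pattern [a,'h'] and replacement [a], as a structural recursion
def pvRep1 (a : Char) : List Char → List Char
  | [] => []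
  | [c] => [c]
  | c :: d :: t =>
    if c = a ∧ d = 'h' then a :: pvRep1 a t
    else c :: pvRep1 a (d :: t)

theorem pvRep1_go (a : Char) : ∀ (fuel : Nat) (l acc : List Char), l.length ≤ fuel →
    PySem.Chars.replace.go [a, 'h'] [a] fuel l acc = acc.reverse ++ pvRep1 a l := by
  intro fuel
  induction fuel with
  | zero =>
    intro l acc h
    have hl : l = [] := List.eq_nil_of_length_eq_zero (Nat.le_zero.mp h)
    subst hl
    simp [PySem.Chars.replace.go, pvRep1]
  | succ n ih =>
    intro l acc h
    match l with
    | [] => simp [PySem.Chars.replace.go, pvRep1]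
    | [c] =>
      have hpre : List.isPrefixOf [a, 'h'] [c] = false := by
        simp [List.isPrefixOf]
      simp only [PySem.Chars.replace.go, hpre, Bool.false_eq_true, if_false]
      have := ih [] (c :: acc) (by simp)
      simpa [pvRep1] using this
    | c :: d :: t =>
      by_cases hca : c = a ∧ d = 'h'
      · obtain ⟨hc, hd⟩ := hca
        have hpre : List.isPrefixOf [a, 'h'] (c :: d :: t) = true := by
          rw [List.isPrefixOf_iff_prefix]
          exact List.cons_prefix_cons.mpr ⟨hc.symm, List.cons_prefix_cons.mpr ⟨hd.symm, by simp⟩⟩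
        simp only [PySem.Chars.replace.go, hpre, if_true]
        have hlen : t.length ≤ n := by simp at h; omega
        have hrec := ih (List.drop ([a, 'h'] : List Char).length (c :: d :: t)) ([a].reverse ++ acc)
          (by simpa using hlen)
        rw [hrec]
        simp [pvRep1, hc, hd]
      · have hpre : List.isPrefixOf [a, 'h'] (c :: d :: t) = false := by
          rw [Bool.eq_false_iff]
          intro hT
          rw [List.isPrefixOf_iff_prefix] at hT
          obtain ⟨h1, hT2⟩ := List.cons_prefix_cons.mp hT
          obtain ⟨h2, _⟩ := List.cons_prefix_cons.mp hT2
          exact hca ⟨h1.symm, h2.symm⟩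
        simp only [PySem.Chars.replace.go, hpre, Bool.false_eq_true, if_false]
        have := ih (d :: t) (c :: acc) (by simp at h ⊢; omega)
        rw [this]
        simp [pvRep1, hca]

theorem pvRep1_replace (a : Char) (l : List Char) :
    PySem.Chars.replace l [a, 'h'] [a] = pvRep1 a l := by
  unfold PySem.Chars.replace
  simpa using pvRep1_go a l.length l [] le_rfl

-- a pass leaves c :: X alone when (c, head of X) is not the pattern
theorem pvRep1_pass (a c : Char) (X : List Char)
    (h : ¬ (c = a ∧ X.head? = some 'h')) :
    pvRep1 a (c :: X) = c :: pvRep1 a X := by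
  match X with
  | [] => simp [pvRep1]
  | d :: t =>
    have hnot : ¬ (c = a ∧ d = 'h') := by
      intro hcd; exact h ⟨hcd.1, by simp [hcd.2]⟩
    simp [pvRep1, hnot]

theorem pvRep1_head (a d : Char) (t : List Char) :
    (pvRep1 a (d :: t)).head? = some d := by
  match t with
  | [] => simp [pvRep1]
  | e :: t' =>
    by_cases h : d = a ∧ e = 'h'
    · obtain ⟨h1, h2⟩ := h; subst h1; subst h2; simp [pvRep1]
    · simp [pvRep1, h]

theorem pvRep1_cons (a d : Char) (t : List Char) :
    ∃ X, pvRep1 a (d :: t) = d :: X := by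
  have hh := pvRep1_head a d t
  cases hl : pvRep1 a (d :: t) with
  | nil => rw [hl] at hh; simp at hh
  | cons x xs =>
    rw [hl] at hh; simp at hh
    exact ⟨xs, by rw [hh]⟩

theorem pvRep1_chain_eq_norm : ∀ (l : List Char),
    pvRep1 'c' (pvRep1 'z' (pvRep1 's' l)) = pvNorm l := by
  intro l
  induction l using pvNorm.induct with
  | case1 => simp [pvRep1, pvNorm]
  | case2 c => simp [pvRep1, pvNorm]
  | case3 c d t hcond ih =>
    obtain ⟨hc, hd⟩ := hcond
    subst hd
    rcases hc with hc | hc | hc <;> subst hc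
    · -- 's' :: 'h' :: t : first pass matches, the others pass 's' through
      have h1 : pvRep1 's' ('s' :: 'h' :: t) = 's' :: pvRep1 's' t := by simp [pvRep1]
      rw [h1, pvRep1_pass 'z' 's' _ (by simp), pvRep1_pass 'c' 's' _ (by simp)]
      simp [pvNorm, ih]
    · -- 'z' :: 'h' :: t : second pass matches
      have h1 : pvRep1 's' ('z' :: 'h' :: t) = 'z' :: 'h' :: pvRep1 's' t := by
        rw [pvRep1_pass 's' 'z' _ (by simp), pvRep1_pass 's' 'h' _ (by simp)]
      have h2 : pvRep1 'z' ('z' :: 'h' :: pvRep1 's' t) = 'z' :: pvRep1 'z' (pvRep1 's' t) := by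
        simp [pvRep1]
      rw [h1, h2, pvRep1_pass 'c' 'z' _ (by simp)]
      simp [pvNorm, ih]
    · -- 'c' :: 'h' :: t : third pass matches
      have h1 : pvRep1 's' ('c' :: 'h' :: t) = 'c' :: 'h' :: pvRep1 's' t := by
        rw [pvRep1_pass 's' 'c' _ (by simp), pvRep1_pass 's' 'h' _ (by simp)]
      have h2 : pvRep1 'z' ('c' :: 'h' :: pvRep1 's' t) = 'c' :: 'h' :: pvRep1 'z' (pvRep1 's' t) := by
        rw [pvRep1_pass 'z' 'c' _ (by simp), pvRep1_pass 'z' 'h' _ (by simp)]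
      have h3 : pvRep1 'c' ('c' :: 'h' :: pvRep1 'z' (pvRep1 's' t)) =
          'c' :: pvRep1 'c' (pvRep1 'z' (pvRep1 's' t)) := by
        simp [pvRep1]
      rw [h1, h2, h3]
      simp [pvNorm, ih]
  | case4 c d t hcond ih =>
    -- no digraph at the front: every pass carries c through
    have hnd : ∀ a : Char, (a = 's' ∨ a = 'z' ∨ a = 'c') → ¬ (c = a ∧ d = 'h') := by
      intro a ha hcd
      apply hcond
      refine ⟨?_, hcd.2⟩
      rw [hcd.1]
      exact ha
    have h1 : pvRep1 's' (c :: d :: t) = c :: pvRep1 's' (d :: t) := by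
      apply pvRep1_pass
      intro hx
      exact hnd 's' (by left; rfl) ⟨hx.1, by simpa using hx.2⟩
    obtain ⟨X1, hX1⟩ := pvRep1_cons 's' d t
    have h2 : pvRep1 'z' (c :: pvRep1 's' (d :: t)) = c :: pvRep1 'z' (pvRep1 's' (d :: t)) := by
      apply pvRep1_pass
      rw [hX1]
      intro hx
      exact hnd 'z' (by right; left; rfl) ⟨hx.1, by simpa using hx.2⟩
    obtain ⟨X2, hX2⟩ := pvRep1_cons 'z' d X1
    have h3 : pvRep1 'c' (c :: pvRep1 'z' (pvRep1 's' (d :: t))) =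
        c :: pvRep1 'c' (pvRep1 'z' (pvRep1 's' (d :: t))) := by
      apply pvRep1_pass
      rw [hX1, hX2]
      intro hx
      exact hnd 'c' (by right; right; rfl) ⟨hx.1, by simpa using hx.2⟩
    rw [h1, h2, h3, ih]
    simp [pvNorm, hcond]

theorem pvChain_list (l : List Char) :
    PySem.Chars.replace (PySem.Chars.replace (PySem.Chars.replace l ['s', 'h'] ['s'])
      ['z', 'h'] ['z']) ['c', 'h'] ['c'] = pvNorm l := by
  rw [pvRep1_replace, pvRep1_replace, pvRep1_replace, pvRep1_chain_eq_norm]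

theorem eqPingQiaoShe_unfold (c1 c2 : String) :
    eqPingQiaoShe_py c1 c2 = eqPingQiaoShe_py_alt c1 c2 := by
  have key : ∀ s : String,
      PySem.Str.replace (PySem.Str.replace (PySem.Str.replace s "sh" "s") "zh" "z") "ch" "c" =
        String.ofList (pvNorm s.toList) := by
    intro s
    have h := congrArg String.ofList (pvChain_list s.toList)
    rw [show (PySem.Str.replace (PySem.Str.replace (PySem.Str.replace s "sh" "s") "zh" "z") "ch" "c") =
          String.ofList (PySem.Chars.replace (PySem.Chars.replace (PySem.Chars.replace s.toList
            ['s', 'h'] ['s']) ['z', 'h'] ['z']) ['c', 'h'] ['c']) from by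
      simp only [PySem.Str.replace, String.toList_ofList]
      rfl]
    exact h
  have hA : eqPingQiaoShe_py c1 c2 =
      (PySem.Str.replace (PySem.Str.replace (PySem.Str.replace c1 "sh" "s") "zh" "z") "ch" "c" ==
       PySem.Str.replace (PySem.Str.replace (PySem.Str.replace c2 "sh" "s") "zh" "z") "ch" "c") := rfl
  rw [hA, key c1, key c2]
  rfl

-- ===== VERDICT (by name: the statement is the Claim_ definition above) =====
theorem eqPingQiaoShe_py_spec : Claim_equal_eqPingQiaoShe_py := by
  intro c1 c2 _
  unfold Spec_eqPingQiaoShe_py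
  exact eqPingQiaoShe_unfold c1 c2
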